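-- pv_equiv track=rewrite | github.com/samyuktahegde/Python | datastructures/arrays/check_divisibility.py | all_digits_divide
-- ===== SOURCE A (Python) =====
-- def check_divisibility(n, digit):
--     return (digit != 0 and n%digit == 0)
--
-- def all_digits_divide(n):
--     temp = n
--     while temp>0:
--         digit = temp%10
--         if check_divisibility(n, digit) == False:
--             return False
--         temp = temp//10
--     return True
-- ===== SOURCE B (Python) =====
-- def all_digits_divide(n):
--     if n <= 0:
--         return True
--     s = str(n)
--     # Invert the loop: instead of scanning n's digits, scan the ten possible
--     # divisors 0..9 and reject if any non-divisor (or 0) occurs in n's decimal string.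
--     return not any(str(d) in s for d in range(10) if d == 0 or n % d != 0)
-- ===== Notes on version B (the rewrite author's own statement) =====
-- stated objective: alternative
-- what changed: B inverts the traversal: instead of A's loop peeling n's digits and testing each, B iterates over the ten fixed candidate decimal digits and returns False iff some candidate failing the divisibility test occurs as a substring of str(n).
import Mathlib
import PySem

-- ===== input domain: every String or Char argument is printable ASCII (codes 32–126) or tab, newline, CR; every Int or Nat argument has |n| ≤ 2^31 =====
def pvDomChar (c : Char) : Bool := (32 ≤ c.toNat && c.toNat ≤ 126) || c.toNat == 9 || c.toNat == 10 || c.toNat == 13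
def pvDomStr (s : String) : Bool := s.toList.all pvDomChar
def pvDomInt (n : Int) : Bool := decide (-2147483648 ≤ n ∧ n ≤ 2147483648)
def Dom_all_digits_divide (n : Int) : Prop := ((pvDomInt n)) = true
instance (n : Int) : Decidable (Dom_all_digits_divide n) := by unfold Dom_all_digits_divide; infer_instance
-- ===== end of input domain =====

-- B inverts the traversal: it scans the ten fixed candidate digits 0..9 and rejects iff a
-- non-dividing one occurs in str(n), instead of A's peeling of n's digits (alternative; same cost).

-- ===== PORT A =====
def check_divisibility (n digit : Int) : Bool :=
  digit != 0 && PySem.Int.mod n digit == 0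

-- the while loop of A: temp is peeled by // 10 until it is ≤ 0
def adLoop (n temp : Int) : Bool :=
  if _h : temp > 0 then
    let digit := PySem.Int.mod temp 10
    if check_divisibility n digit == false then false
    else adLoop n (PySem.Int.floordiv temp 10)
  else true
termination_by temp.toNat
decreasing_by
  rw [PySem.Int.floordiv_eq_ediv_of_pos (by omega : (0:Int) < 10)]
  omega

def all_digits_divide (n : Int) : Bool := adLoop n n

-- ===== PORT B =====
-- 'str(d) in s' is PySem.Chars.isIn on the character lists (exact substring test);
-- the generator 'for d in range(10) if bad(d)' is any over pyRange with the filter folded into the predicate.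
def all_digits_divide_alt (n : Int) : Bool :=
  if n ≤ 0 then true
  else
    let s := PySem.Int.toChars n
    !((PySem.List.pyRange 0 10 1).any
        (fun d => (d == 0 || PySem.Int.mod n d != 0) && PySem.Chars.isIn (PySem.Int.toChars d) s))

-- ===== PRECONDITION & SPEC =====
def Spec_all_digits_divide (n : Int) (out : Bool) : Prop := out = all_digits_divide_alt n
instance (n : Int) (out : Bool) : Decidable (Spec_all_digits_divide n out) := by unfold Spec_all_digits_divide; infer_instance

-- ===== CLAIM =====
def Claim_equal_all_digits_divide : Prop := ∀ (n : Int), Dom_all_digits_divide n → Spec_all_digits_divide n (all_digits_divide n)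

-- ===== LEMMAS AND PROOFS =====

-- A's loop computes `all check_divisibility` over the base-10 digits (least significant first) of temp.
theorem adLoop_eq_digits (n : Int) : ∀ (t : Int),
    adLoop n t = (Nat.digits 10 t.toNat).all (fun d => check_divisibility n (d : Int)) := by
  intro t
  induction ht : t.toNat using Nat.strong_induction_on generalizing t with
  | _ m ih =>
    subst ht
    rw [adLoop]
    by_cases hpos : t > 0
    · simp only [hpos, dite_true]
      have ht10 : (0:Int) < 10 := by omega
      have hmod : PySem.Int.mod t 10 = ((t.toNat % 10 : Nat) : Int) := by
        rw [PySem.Int.mod_eq_emod_of_pos ht10]; omega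
      have hdiv : PySem.Int.floordiv t 10 = ((t.toNat / 10 : Nat) : Int) := by
        rw [PySem.Int.floordiv_eq_ediv_of_pos ht10]; omega
      have hdigits : Nat.digits 10 t.toNat
          = t.toNat % 10 :: Nat.digits 10 (t.toNat / 10) :=
        Nat.digits_def' (by norm_num) (by omega)
      rw [hdigits, hmod, hdiv, ih (t.toNat / 10) (by omega) _ (by omega)]
      simp only [List.all_cons]
      cases check_divisibility n ((t.toNat % 10 : Nat) : Int) <;> simp
    · simp only [hpos, dite_false]
      have h0 : t.toNat = 0 := by omega
      rw [h0]; simp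

-- Nat.toDigits on a positive m is the reversed digit list rendered with Nat.digitChar.
theorem toDigitsCore_eq (f : Nat) : ∀ (m : Nat) (l : List Char), 0 < m → m ≤ f →
    Nat.toDigitsCore 10 f m l = ((Nat.digits 10 m).map Nat.digitChar).reverse ++ l := by
  induction f with
  | zero => intro m l hm hf; omega
  | succ f ih =>
    intro m l hm hf
    have hdigits : Nat.digits 10 m = m % 10 :: Nat.digits 10 (m / 10) :=
      Nat.digits_def' (by norm_num) hm
    rw [Nat.toDigitsCore, hdigits]
    by_cases h0 : m / 10 = 0
    · simp [h0, Nat.digits_zero]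
    · simp only [h0, if_false]
      rw [ih (m / 10) _ (by omega) (by omega)]
      simp

theorem toDigits_eq (m : Nat) (hm : 0 < m) :
    Nat.toDigits 10 m = ((Nat.digits 10 m).map Nat.digitChar).reverse := by
  unfold Nat.toDigits
  rw [toDigitsCore_eq (m + 1) m [] hm (by omega)]
  simp

-- str(d) for a single decimal digit 0 ≤ d < 10 is the one-character list [digitChar d]
theorem toChars_single_digit (d : Int) (h0 : 0 ≤ d) (h10 : d < 10) :
    PySem.Int.toChars d = [Nat.digitChar d.toNat] := by
  interval_cases d <;> rfl

-- digitChar is injective below 10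
theorem digitChar_inj_lt_ten : ∀ d < 10, ∀ e < 10, Nat.digitChar d = Nat.digitChar e → d = e := by
  decide

-- membership of digitChar d in the rendered digit string ↔ d is a digit of m
theorem digitChar_mem_iff (m d : Nat) (hd : d < 10) :
    (Nat.digitChar d ∈ ((Nat.digits 10 m).map Nat.digitChar).reverse) ↔ d ∈ Nat.digits 10 m := by
  rw [List.mem_reverse, List.mem_map]
  constructor
  · rintro ⟨e, he, heq⟩
    have he10 : e < 10 := Nat.digits_lt_base (by norm_num) he
    rwa [← digitChar_inj_lt_ten e he10 d hd heq]
  · intro h; exact ⟨d, h, rfl⟩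

-- ===== VERDICT =====
theorem all_digits_divide_spec : Claim_equal_all_digits_divide := by
  intro n _
  unfold Spec_all_digits_divide all_digits_divide all_digits_divide_alt
  by_cases hn : n ≤ 0
  · rw [adLoop]; simp [hn, show ¬ n > 0 by omega]
  · simp only [hn, if_false]
    rw [adLoop_eq_digits]
    have hpos : 0 < n.toNat := by omega
    have hchars : PySem.Int.toChars n = ((Nat.digits 10 n.toNat).map Nat.digitChar).reverse := by
      unfold PySem.Int.toChars
      simp [show ¬ n < 0 by omega, toDigits_eq n.toNat hpos]
    rw [Bool.eq_iff_iff, List.all_eq_true, Bool.not_eq_true', List.any_eq_false]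
    have hbounds : ∀ d ∈ PySem.List.pyRange 0 10 1, 0 ≤ d ∧ d < 10 := by decide
    constructor
    · intro h d hd
      obtain ⟨hd0, hd10⟩ := hbounds d hd
      rw [hchars, toChars_single_digit d hd0 hd10]
      by_cases hmem : d.toNat ∈ Nat.digits 10 n.toNat
      · have hc := h d.toNat hmem
        have hdcast : ((d.toNat : Int)) = d := by omega
        rw [hdcast] at hc
        unfold check_divisibility at hc
        simp only [Bool.and_eq_true, bne_iff_ne, beq_iff_eq] at hc
        simp [hc.1, hc.2]
      · have : PySem.Chars.isIn [Nat.digitChar d.toNat]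
            (((Nat.digits 10 n.toNat).map Nat.digitChar).reverse) = false := by
          rw [PySem.Chars.isIn_eq_false_iff, List.singleton_infix_iff]
          rw [digitChar_mem_iff n.toNat d.toNat (by omega)]
          exact hmem
        simp [this]
    · intro h d hd
      have hd10 : d < 10 := Nat.digits_lt_base (by norm_num) hd
      have hdr : (d : Int) ∈ PySem.List.pyRange 0 10 1 := by
        interval_cases d <;> decide
      have hc := h (d : Int) hdr
      rw [hchars, toChars_single_digit (d : Int) (by omega) (by omega)] at hc
      have hmem : PySem.Chars.isIn [Nat.digitChar ((d : Int)).toNat]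
          (((Nat.digits 10 n.toNat).map Nat.digitChar).reverse) = true := by
        rw [PySem.Chars.isIn_iff_infix, List.singleton_infix_iff]
        have : ((d : Int)).toNat = d := by omega
        rw [this, digitChar_mem_iff n.toNat d hd10]
        exact hd
      rw [hmem, Bool.and_true] at hc
      unfold check_divisibility
      simp at hc
      simp [hc.1, hc.2]
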